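-- pv_equiv track=rewrite | github.com/danny094/Jarvis | adapters/runtime-hardware/runtime_hardware/connectors/container_storage_discovery.py | _path_within_managed_paths
-- ===== SOURCE A (Python) =====
-- from typing import Any, Dict, List
--
-- def _path_within_managed_paths(path: str, managed_paths: List[str]) -> bool:
--     candidate = str(path or "").strip().rstrip("/") or "/"
--     if not managed_paths:
--         return True
--     for base in managed_paths:
--         normalized = str(base or "").strip().rstrip("/") or "/"
--         if candidate == normalized or candidate.startswith(f"{normalized}/"):
--             return True
--     return False
-- ===== SOURCE B (Python) =====
-- def _path_within_managed_paths(path, managed_paths):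
--     if not managed_paths:
--         return True
--     candidate = str(path or "").strip().rstrip("/") or "/"
--     bases = {str(base or "").strip().rstrip("/") or "/" for base in managed_paths}
--     if candidate in bases:
--         return True
--     return any(candidate[:i] in bases for i in range(len(candidate)) if candidate[i] == "/")
-- ===== Notes on version B (the rewrite author's own statement) =====
-- stated objective: alternative
-- what changed: B normalizes all bases once into a set and then probes the candidate's slash-boundary prefixes for membership, instead of scanning every base and doing a string startswith-test per base.
import Mathlib
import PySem

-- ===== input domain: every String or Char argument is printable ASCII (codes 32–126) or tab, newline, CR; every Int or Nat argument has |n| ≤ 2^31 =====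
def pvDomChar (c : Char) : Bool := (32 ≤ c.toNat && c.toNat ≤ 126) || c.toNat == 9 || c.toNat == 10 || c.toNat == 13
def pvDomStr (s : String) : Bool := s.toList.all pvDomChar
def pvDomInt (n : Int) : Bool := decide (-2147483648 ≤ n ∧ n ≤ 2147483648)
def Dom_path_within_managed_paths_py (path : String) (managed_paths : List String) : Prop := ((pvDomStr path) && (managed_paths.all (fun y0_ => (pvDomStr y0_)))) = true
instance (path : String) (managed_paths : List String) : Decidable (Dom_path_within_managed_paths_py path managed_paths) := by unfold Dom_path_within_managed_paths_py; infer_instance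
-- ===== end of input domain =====

-- B builds a set of normalized bases once and tests the candidate's slash-boundary prefixes for membership (alternative algorithm, same results).
-- ===== PORT A =====
-- str.rstrip("/") ported by hand (exact): drop the trailing '/' characters.
def pwmRstripSlash (cs : List Char) : List Char :=
  (cs.reverse.dropWhile (fun c => c == '/')).reverse

-- `str(x or "").strip().rstrip("/") or "/"` (the same expression appears in A and in B)
def pwmNorm (s : String) : List Char :=
  let t := pwmRstripSlash (PySem.Chars.strip s.toList)
  if t = [] then ['/'] else t

def path_within_managed_paths_py (path : String) (managed_paths : List String) : Bool :=
  let candidate := pwmNorm path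
  if managed_paths = [] then true
  else
    managed_paths.any (fun base =>
      let normalized := pwmNorm base
      candidate == normalized || PySem.Chars.startswith candidate (normalized ++ ['/']))

-- ===== PORT B =====
def path_within_managed_paths_py_alt (path : String) (managed_paths : List String) : Bool :=
  if managed_paths = [] then true
  else
    let candidate := pwmNorm path
    let bases : PySem.Set (List Char) := PySem.Set.ofList (managed_paths.map pwmNorm)
    if PySem.Set.contains bases candidate then true
    else
      (List.range candidate.length).any (fun i =>
        if candidate[i]? == some '/' then PySem.Set.contains bases (candidate.take i) else false)

-- ===== PRECONDITION & SPEC =====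
def Spec_path_within_managed_paths_py (path : String) (managed_paths : List String) (out : Bool) : Prop := out = path_within_managed_paths_py_alt path managed_paths
instance (path : String) (managed_paths : List String) (out : Bool) : Decidable (Spec_path_within_managed_paths_py path managed_paths out) := by unfold Spec_path_within_managed_paths_py; infer_instance

-- ===== CLAIM (what is proved, stated in full; the proofs are below) =====
def Claim_equal_path_within_managed_paths_py : Prop := ∀ (path : String) (managed_paths : List String), Dom_path_within_managed_paths_py path managed_paths → Spec_path_within_managed_paths_py path managed_paths (path_within_managed_paths_py path managed_paths)

-- ===== LEMMAS AND PROOFS =====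

-- (n ++ ['/']) is a prefix of cs  ↔  some slash-boundary prefix of cs equals n
lemma pwm_append_slash_prefix_iff (n cs : List Char) :
    (n ++ ['/']) <+: cs ↔ ∃ i, i < cs.length ∧ getElem? cs i = some '/' ∧ cs.take i = n := by
  constructor
  · rintro ⟨t, ht⟩
    refine ⟨n.length, ?_, ?_, ?_⟩
    · subst ht; simp
    · subst ht; simp
    · subst ht; simp
  · rintro ⟨i, hi, hget, htake⟩
    have h1 : cs.take (i + 1) = n ++ ['/'] := by
      rw [List.take_add_one, htake]
      simp [hget]
    exact h1 ▸ List.take_prefix _ _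

lemma pwm_cond_iff (cs : List Char) (ns : List (List Char)) :
    (∃ n ∈ ns, cs = n ∨ (n ++ ['/']) <+: cs) ↔
      (cs ∈ ns ∨ ∃ i, i < cs.length ∧ getElem? cs i = some '/' ∧ cs.take i ∈ ns) := by
  constructor
  · rintro ⟨n, hn, h | h⟩
    · exact Or.inl (h ▸ hn)
    · obtain ⟨i, hi, hget, htake⟩ := (pwm_append_slash_prefix_iff n cs).1 h
      exact Or.inr ⟨i, hi, hget, htake ▸ hn⟩
  · rintro (h | ⟨i, hi, hget, htake⟩)
    · exact ⟨cs, h, Or.inl rfl⟩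
    · exact ⟨cs.take i, htake, Or.inr ((pwm_append_slash_prefix_iff _ cs).2 ⟨i, hi, hget, rfl⟩)⟩

-- B's body (after the empty-list guard) computes exactly the disjunction on the right
lemma pwm_alt_eq_decide (cs : List Char) (ns : List (List Char)) :
    (if PySem.Set.contains (PySem.Set.ofList ns) cs then true
     else (List.range cs.length).any (fun i =>
       if cs[i]? == some '/' then PySem.Set.contains (PySem.Set.ofList ns) (cs.take i) else false))
    = decide (cs ∈ ns ∨ ∃ i, i < cs.length ∧ getElem? cs i = some '/' ∧ cs.take i ∈ ns) := by
  by_cases hc : cs ∈ ns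
  · simp [PySem.Set.contains, PySem.Set.mem_ofList, hc]
  · have hco : PySem.Set.contains (PySem.Set.ofList ns) cs = false := by
      simp [PySem.Set.contains, PySem.Set.mem_ofList, hc]
    rw [hco]
    simp only [Bool.false_eq_true, if_false]
    rw [Bool.eq_iff_iff]
    simp only [decide_eq_true_eq, List.any_eq_true, List.mem_range]
    constructor
    · rintro ⟨i, hi, hif⟩
      by_cases hg : getElem? cs i = some '/'
      · rw [if_pos (by simp [hg])] at hif
        exact Or.inr ⟨i, hi, hg, by simpa [PySem.Set.contains, PySem.Set.mem_ofList] using hif⟩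
      · rw [if_neg (by simp [hg])] at hif
        exact absurd hif (by simp)
    · rintro (h | ⟨i, hi, hget, htake⟩)
      · exact absurd h hc
      · refine ⟨i, hi, ?_⟩
        rw [if_pos (by simp [hget])]
        simp [PySem.Set.contains, PySem.Set.mem_ofList, htake]
-- ===== VERDICT (by name: the statement is the Claim_ definition above) =====
theorem path_within_managed_paths_py_spec : Claim_equal_path_within_managed_paths_py := by
  intro path managed_paths _
  unfold Spec_path_within_managed_paths_py path_within_managed_paths_py path_within_managed_paths_py_alt
  rcases eq_or_ne managed_paths [] with h | h
  · simp [h]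
  · simp only [if_neg h]
    rw [pwm_alt_eq_decide, Bool.eq_iff_iff]
    simp only [decide_eq_true_eq, List.any_eq_true, Bool.or_eq_true, beq_iff_eq,
      PySem.Chars.startswith_iff]
    rw [← pwm_cond_iff (pwmNorm path) (managed_paths.map pwmNorm)]
    constructor
    · rintro ⟨b, hb, hcond⟩
      exact ⟨pwmNorm b, List.mem_map_of_mem hb, hcond⟩
    · rintro ⟨n, hn, hcond⟩
      obtain ⟨b, hb, rfl⟩ := List.mem_map.1 hn
      exact ⟨b, hb, hcond⟩
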